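-- pv_equiv track=rewrite | github.com/JooaeSon/Daily_CodingTest | Programmers/Lv.3/최고의 집합.py | solution
-- ===== SOURCE A (Python) =====
-- def solution(n, s):
--     if s//n == 0:
--         return [-1]
--     result = [s//n]*n # 분산이 가장 작은 값으로
--     idx = len(result)-1
--
--     for _ in range(s % n): #뒤에서부터 차례로 +1씩 더해주기
--         result[idx] += 1
--         idx -= 1
--
--     return result
-- ===== SOURCE B (Python) =====
-- def solution(n, s):
--     if s // n == 0:
--         return [-1]
--     result = []
--     remaining, k = s, n
--     while k > 0:
--         x = remaining // k   # fair share of what is still to distribute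
--         result.append(x)
--         remaining -= x
--         k -= 1
--     return result
-- ===== Notes on version B (the rewrite author's own statement) =====
-- stated objective: alternative
-- what changed: Replaces the 'fill with s//n then bump the last s%n slots' scheme by a greedy single pass that never computes s%n: each element is remaining_sum // remaining_count, subtracted as it is emitted; evenness follows from the floor-division invariant.
import Mathlib
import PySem

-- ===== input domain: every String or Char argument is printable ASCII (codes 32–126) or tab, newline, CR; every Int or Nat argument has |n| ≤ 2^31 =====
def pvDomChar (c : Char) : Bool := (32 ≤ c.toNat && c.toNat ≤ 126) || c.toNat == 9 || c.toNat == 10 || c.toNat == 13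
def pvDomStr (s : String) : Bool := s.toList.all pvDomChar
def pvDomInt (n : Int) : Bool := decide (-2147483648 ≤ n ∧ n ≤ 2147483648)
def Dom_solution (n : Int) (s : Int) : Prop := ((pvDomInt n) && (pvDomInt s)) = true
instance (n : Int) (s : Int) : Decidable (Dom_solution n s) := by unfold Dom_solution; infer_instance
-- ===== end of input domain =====

-- B replaces A's fill-then-bump scheme (base value s//n everywhere, then +1 on the last
-- s%n slots) by a greedy single pass: each element is remaining_sum // remaining_count,
-- subtracted as emitted; return values proved equal on n ≠ 0.

-- ===== PORT A =====
-- result[idx] += 1 with Python index semantics (negative index counts from the end);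
-- exact whenever the index is in range, which under Pre_ it always is.
def pyIncAt (xs : List Int) (i : Int) : List Int :=
  let j : Int := if i < 0 then i + xs.length else i
  xs.set j.toNat (xs.getD j.toNat 0 + 1)

def solution (n : Int) (s : Int) : List Int :=
  if PySem.Int.floordiv s n = 0 then [-1]
  else
    let result := List.replicate n.toNat (PySem.Int.floordiv s n)
    let st := (PySem.List.pyRange 0 (PySem.Int.mod s n) 1).foldl
      (fun (p : List Int × Int) _ => (pyIncAt p.1 p.2, p.2 - 1))
      (result, (result.length : Int) - 1)
    st.1

-- ===== PORT B =====
-- the 'while k > 0' loop of Source B, as recursion on the (nonnegative) counter k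
def greedy : Nat → Int → List Int
  | 0, _ => []
  | Nat.succ k, remaining =>
      let x := PySem.Int.floordiv remaining ((k + 1 : Nat) : Int)
      x :: greedy k (remaining - x)

def solution_alt (n : Int) (s : Int) : List Int :=
  if PySem.Int.floordiv s n = 0 then [-1]
  else greedy n.toNat s

-- ===== PRECONDITION & SPEC =====
-- Pre_ excludes only n = 0, where both Pythons raise ZeroDivisionError.
def Pre_solution (n : Int) (s : Int) : Prop := n ≠ 0
instance (n : Int) (s : Int) : Decidable (Pre_solution n s) := by unfold Pre_solution; infer_instance
def pvWitness_solution : Int × Int := (3, 11)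

def Spec_solution (n : Int) (s : Int) (out : List Int) : Prop := out = solution_alt n s
instance (n : Int) (s : Int) (out : List Int) : Decidable (Spec_solution n s out) := by unfold Spec_solution; infer_instance

-- ===== CLAIM (what is proved, stated in full; the proofs are below) =====
def Claim_equal_solution : Prop := ∀ (n : Int) (s : Int), Dom_solution n s → Pre_solution n s → Spec_solution n s (solution n s)

-- ===== LEMMAS AND PROOFS =====

-- a fold that ignores the list elements is an iteration of the step, length-many times
theorem foldl_ignore {α σ : Type} (g : σ → σ) (l : List α) (st : σ) :
    List.foldl (fun p _ => g p) st l = g^[l.length] st := by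
  induction l generalizing st with
  | nil => rfl
  | cons x t ih => simp [List.foldl, ih, Function.iterate_succ_apply]

-- one increment step at index m+k on a block list
theorem inc_step (q : Int) (m k a : Nat) :
    pyIncAt (List.replicate (m + k + 1) q ++ List.replicate a (q + 1)) ((m : Int) + k) =
      List.replicate (m + k) q ++ List.replicate (a + 1) (q + 1) := by
  unfold pyIncAt
  have hnn : ¬ ((m : Int) + k < 0) := by omega
  simp only [hnn, if_false]
  have hj : ((m : Int) + k).toNat = m + k := by omega
  rw [hj]
  have hget : (List.replicate (m + k + 1) q ++ List.replicate a (q + 1)).getD (m + k) 0 = q := by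
    simp [List.getD, List.getElem?_append]
  rw [hget]
  apply List.ext_getElem
  · simp; omega
  · intro i h1 h2
    by_cases hi : i = m + k
    · subst hi
      rw [List.getElem_set_self (by simpa using h1)]
      simp [List.getElem_replicate]
    · rw [List.getElem_set_ne (by omega)]
      simp only [List.getElem_append, List.length_replicate]
      split_ifs with h3 h4 h4 <;> simp_all [List.getElem_replicate] <;> omega

-- iterating the step k times moves k elements from the q-block to the (q+1)-block
theorem iter_inc (q : Int) (k : Nat) : ∀ (m a : Nat),
    (fun (p : List Int × Int) => (pyIncAt p.1 p.2, p.2 - 1))^[k]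
      (List.replicate (m + k) q ++ List.replicate a (q + 1), ((m : Int) + k) - 1) =
      (List.replicate m q ++ List.replicate (a + k) (q + 1), (m : Int) - 1) := by
  induction k with
  | zero => intro m a; simp
  | succ k ih =>
    intro m a
    rw [Function.iterate_succ_apply]
    have h1 : (m : Int) + (k + 1 : Nat) - 1 = (m : Int) + k := by push_cast; ring
    have h2 : m + (k + 1) = m + k + 1 := by omega
    rw [h1, h2]
    simp only
    rw [inc_step q m k a]
    rw [ih m (a + 1), show a + 1 + k = a + (k + 1) from by omega]

-- the greedy loop on a sum k*q + r (0 ≤ r < k) yields k-r copies of q then r copies of q+1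
theorem greedy_blocks (k : Nat) : ∀ (q : Int) (r : Nat), r < k →
    greedy k ((k : Int) * q + r) = List.replicate (k - r) q ++ List.replicate r (q + 1) := by
  induction k with
  | zero => intro q r hr; omega
  | succ k ih =>
    intro q r hr
    have hx : PySem.Int.floordiv (((k + 1 : Nat) : Int) * q + r) ((k + 1 : Nat) : Int) = q := by
      rw [PySem.Int.floordiv_eq_iff_of_pos (by exact_mod_cast Nat.succ_pos k)]
      constructor <;> push_cast <;> nlinarith [Nat.cast_nonneg (α := Int) r,
        (by exact_mod_cast hr : (r : Int) < (k : Int) + 1)]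
    show (PySem.Int.floordiv (((k + 1 : Nat) : Int) * q + r) ((k + 1 : Nat) : Int)) ::
        greedy k ((((k + 1 : Nat) : Int) * q + r) -
          PySem.Int.floordiv (((k + 1 : Nat) : Int) * q + r) ((k + 1 : Nat) : Int)) = _
    rw [hx]
    have hrem : (((k + 1 : Nat) : Int) * q + r) - q = (k : Int) * q + r := by push_cast; ring
    rw [hrem]
    by_cases hrk : r < k
    · rw [ih q r hrk]
      have : k + 1 - r = (k - r) + 1 := by omega
      rw [this, List.replicate_succ, List.cons_append]
    · have hrk' : r = k := by omega
      subst hrk'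
      rcases Nat.eq_zero_or_pos r with h0 | hpos
      · subst h0; simp [greedy]
      · have h := ih (q + 1) 0 hpos
        simp only [Nat.cast_zero, add_zero, Nat.sub_zero, List.replicate_zero,
          List.append_nil] at h
        have : (r : Int) * q + r = (r : Int) * (q + 1) := by ring
        rw [this, h]
        have : r + 1 - r = 1 := by omega
        rw [this]
        rfl

-- ===== VERDICT (by name: the statement is the Claim_ definition above) =====
theorem solution_spec : Claim_equal_solution := by
  intro n s _ hn
  unfold Spec_solution solution solution_alt
  by_cases hq : PySem.Int.floordiv s n = 0
  · simp [hq]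
  · simp only [hq, if_false]
    rcases lt_or_gt_of_ne hn with hneg | hpos
    · -- n < 0 : A's blocks are empty and its loop never runs; B's greedy counter is 0
      have hb := PySem.Int.mod_neg_bounds s hneg
      have hrange : PySem.List.pyRange 0 (PySem.Int.mod s n) 1 = [] := by
        rw [PySem.List.pyRange_one]
        simp
        omega
      have hnt : n.toNat = 0 := by omega
      simp [hrange, hnt, greedy]
    · -- n > 0 : 0 ≤ r < n; A's loop runs r times, B's greedy emits n elements
      have hr0 : 0 ≤ PySem.Int.mod s n := PySem.Int.mod_nonneg s hpos
      have hrn : PySem.Int.mod s n < n := PySem.Int.mod_lt s hpos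
      set q := PySem.Int.floordiv s n with hqdef
      set r := PySem.Int.mod s n with hrdef
      obtain ⟨m, hm⟩ : ∃ m : Nat, n.toNat = m + r.toNat := ⟨n.toNat - r.toNat, by omega⟩
      -- B's side: s = n*q + r, so greedy yields the two blocks
      have hs : s = (n.toNat : Int) * q + r.toNat := by
        have h1 : (n.toNat : Int) = n := Int.toNat_of_nonneg hpos.le
        have h2 : ((r.toNat : Nat) : Int) = r := Int.toNat_of_nonneg hr0
        have h3 := PySem.Int.floordiv_mul_add_mod s n
        rw [← hqdef, ← hrdef] at h3
        rw [h1, h2]; linarith [h3]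
      have hB : greedy n.toNat s =
          List.replicate m q ++ List.replicate r.toNat (q + 1) := by
        rw [hs, greedy_blocks n.toNat q r.toNat (by omega)]
        have : n.toNat - r.toNat = m := by omega
        rw [this]
      rw [hB]
      -- A's side: the fold moves r elements from the q-block to the (q+1)-block
      rw [foldl_ignore, PySem.List.length_pyRange_one]
      have hlen : (r - 0).toNat = r.toNat := by omega
      rw [hlen, hm]
      have hcast : ((List.replicate (m + r.toNat) q).length : Int) - 1 =
          ((m : Int) + (r.toNat : Int)) - 1 := by
        simp [List.length_replicate]
      rw [hcast]
      have h := iter_inc q r.toNat m 0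
      rw [show List.replicate 0 (q + 1) = ([] : List Int) from rfl, List.append_nil] at h
      rw [h]
      simp
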